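-- pv_equiv track=rewrite | github.com/Redcof/alziehmer-classification | kaggle_download.py | is_kaggle_url
-- ===== SOURCE A (Python) =====
-- def is_kaggle_url(url):
--     prefixes = ['kaggle.com',
--                 'www.kaggle.com',
--                 'http://kaggle.com',
--                 'http://www.kaggle.com',
--                 'https://www.kaggle.com',
--                 'https://kaggle.com']
--     return any((url.startswith(prefix) for prefix in prefixes))
-- ===== SOURCE B (Python) =====
-- def is_kaggle_url(url):
--     for scheme in ('https://', 'http://'):
--         if url.startswith(scheme):
--             url = url[len(scheme):]
--             break
--     return url.startswith('kaggle.com') or url.startswith('www.kaggle.com')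
-- ===== Notes on version B (the rewrite author's own statement) =====
-- stated objective: simpler
-- what changed: Instead of testing all six enumerated prefixes, B strips an optional http(s):// scheme once and then tests only the two host prefixes kaggle.com / www.kaggle.com.
import Mathlib
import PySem

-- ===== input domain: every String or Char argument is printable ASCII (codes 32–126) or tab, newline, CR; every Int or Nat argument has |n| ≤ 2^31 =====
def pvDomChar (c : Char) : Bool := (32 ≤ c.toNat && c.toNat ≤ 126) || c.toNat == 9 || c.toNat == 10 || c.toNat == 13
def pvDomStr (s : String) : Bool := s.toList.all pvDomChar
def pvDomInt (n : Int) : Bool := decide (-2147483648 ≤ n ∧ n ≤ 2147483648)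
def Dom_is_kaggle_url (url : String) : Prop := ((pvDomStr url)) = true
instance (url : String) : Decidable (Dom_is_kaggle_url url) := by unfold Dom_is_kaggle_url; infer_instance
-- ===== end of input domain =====

-- B strips an optional http(s):// scheme once and then tests only the two host prefixes, instead of enumerating all six scheme+host prefix strings (objective: simpler).


-- ===== PORT A =====
def is_kaggle_url (url : String) : Bool :=
  let prefixes : List String := ["kaggle.com",
                "www.kaggle.com",
                "http://kaggle.com",
                "http://www.kaggle.com",
                "https://www.kaggle.com",
                "https://kaggle.com"]
  prefixes.any (fun prefix_ => PySem.Str.startswith url prefix_)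

-- ===== PORT B =====
def is_kaggle_url_alt (url : String) : Bool :=
  -- for scheme in ('https://','http://'): if url.startswith(scheme): url = url[len(scheme):]; break
  let url :=
    if PySem.Str.startswith url "https://" then PySem.Str.slice url (some 8) none
    else if PySem.Str.startswith url "http://" then PySem.Str.slice url (some 7) none
    else url
  PySem.Str.startswith url "kaggle.com" || PySem.Str.startswith url "www.kaggle.com"

-- ===== PRECONDITION & SPEC =====
def Spec_is_kaggle_url (url : String) (out : Bool) : Prop := out = is_kaggle_url_alt url
instance (url : String) (out : Bool) : Decidable (Spec_is_kaggle_url url out) := by unfold Spec_is_kaggle_url; infer_instance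

-- ===== CLAIM (what is proved, stated in full; the proofs are below) =====
def Claim_equal_is_kaggle_url : Prop := ∀ (url : String), Dom_is_kaggle_url url → Spec_is_kaggle_url url (is_kaggle_url url)

-- ===== LEMMAS AND PROOFS =====


-- startswith on a longer pattern fails whenever it fails on a shorter one
theorem pv_sw_false_of (url p q : String)
    (hpq : q.toList <+: p.toList)
    (h : PySem.Str.startswith url q = false) :
    PySem.Str.startswith url p = false := by
  simp only [PySem.Str.startswith_eq, PySem.Chars.startswith] at h ⊢
  rw [Bool.eq_false_iff] at h ⊢
  intro hp
  exact h (List.isPrefixOf_iff_prefix.mpr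
    (hpq.trans (List.isPrefixOf_iff_prefix.mp hp)))

theorem pv_main (url : String) : is_kaggle_url url = is_kaggle_url_alt url := by
  unfold is_kaggle_url is_kaggle_url_alt
  simp only [List.any_cons, List.any_nil, Bool.or_false]
  by_cases hs : PySem.Str.startswith url "https://" = true
  · -- url = "https://" ++ r
    have hs' : "https://".toList <+: url.toList := by
      rw [PySem.Str.startswith_eq] at hs
      exact (PySem.Chars.startswith_iff _ _).mp hs
    obtain ⟨r, hr⟩ := hs'
    simp only [hs, if_true, PySem.Str.startswith_eq, PySem.Str.toList_slice,
      PySem.Chars.slice_eq_listSlice, PySem.Chars.startswith]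
    rw [show ((8 : Int)) = ((8 : Nat) : Int) by norm_num,
      PySem.List.slice_from_natCast, ← hr]
    simp [List.isPrefixOf]
    exact Bool.or_comm _ _
  · by_cases ht : PySem.Str.startswith url "http://" = true
    · -- url = "http://" ++ r
      have ht' : "http://".toList <+: url.toList := by
        rw [PySem.Str.startswith_eq] at ht
        exact (PySem.Chars.startswith_iff _ _).mp ht
      obtain ⟨r, hr⟩ := ht'
      rw [if_neg hs, if_pos ht]
      simp only [PySem.Str.startswith_eq, PySem.Str.toList_slice,
        PySem.Chars.slice_eq_listSlice, PySem.Chars.startswith]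
      rw [show ((7 : Int)) = ((7 : Nat) : Int) by norm_num,
        PySem.List.slice_from_natCast, ← hr]
      simp [List.isPrefixOf]
    · -- no scheme: the four scheme-carrying tests of A all fail
      have hs0 : PySem.Str.startswith url "https://" = false := by
        simpa using hs
      have ht0 : PySem.Str.startswith url "http://" = false := by
        simpa using ht
      rw [pv_sw_false_of url "http://kaggle.com" "http://" (by decide) ht0,
        pv_sw_false_of url "http://www.kaggle.com" "http://" (by decide) ht0,
        pv_sw_false_of url "https://www.kaggle.com" "https://" (by decide) hs0,
        pv_sw_false_of url "https://kaggle.com" "https://" (by decide) hs0]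
      simp only [PySem.Str.startswith_eq] at hs0 ht0 ⊢
      simp at hs0 ht0
      simp [hs0, ht0]

-- ===== VERDICT (by name: the statement is the Claim_ definition above) =====
theorem is_kaggle_url_spec : Claim_equal_is_kaggle_url := by
  intro url _
  exact pv_main url
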